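-- pv_equiv track=rewrite | github.com/kusc-hsbg/solve | coding test/BAEKJOON/Gold/_5430.py | ac_program
-- ===== SOURCE A (Python) =====
-- from collections import deque
--
-- def ac_program(p, n, arr):
--     deq = deque(arr)
--     reverse = False
--
--     try:
--         for cmd in p:
--             if cmd == 'R':
--                 reverse = not reverse
--             elif cmd == 'D':
--                 if not deq:
--                     return "error"
--                 if reverse:
--                     deq.pop()
--                 else:
--                     deq.popleft()
--     except IndexError:
--         return "error"
--
--     if reverse:
--         deq.reverse()
--
--     return '[' + ','.join(map(str, deq)) + ']'
-- ===== SOURCE B (Python) =====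
-- def ac_program(p, n, arr):
--     rev, front, total = False, 0, 0
--     for cmd in p:
--         if cmd == 'R':
--             rev = not rev
--         elif cmd == 'D':
--             total += 1
--             if not rev:
--                 front += 1
--     if total > len(arr):
--         return "error"
--     res = arr[front:len(arr) - (total - front)]
--     if rev:
--         res.reverse()
--     return '[' + ','.join(map(str, res)) + ']'
-- ===== Notes on version B (the rewrite author's own statement) =====
-- stated objective: alternative
-- what changed: B never simulates the deque: a single counting pass records the reverse parity, the total number of D's and how many fell on the front; 'error' becomes one comparison of the total against len(arr), and the survivors are one slice of the untouched input, reversed if the final parity is odd.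
import Mathlib
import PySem

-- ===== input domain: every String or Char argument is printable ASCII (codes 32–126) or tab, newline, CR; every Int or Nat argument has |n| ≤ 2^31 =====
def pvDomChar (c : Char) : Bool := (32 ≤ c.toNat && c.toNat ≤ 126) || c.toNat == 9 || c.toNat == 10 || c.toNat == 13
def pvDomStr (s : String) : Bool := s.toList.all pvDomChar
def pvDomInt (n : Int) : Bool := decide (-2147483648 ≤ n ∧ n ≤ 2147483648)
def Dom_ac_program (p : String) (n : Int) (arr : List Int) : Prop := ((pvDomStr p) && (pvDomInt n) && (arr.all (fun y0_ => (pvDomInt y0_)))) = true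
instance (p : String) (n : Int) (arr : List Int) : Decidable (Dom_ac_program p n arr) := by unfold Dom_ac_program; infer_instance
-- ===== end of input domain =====

-- B drops A's deque simulation entirely: one counting pass records the reverse parity, the
-- total number of deletions and how many fell on the front; 'error' becomes a single
-- comparison against len(arr) and the survivors one slice of the untouched input (alternative).

-- ===== PORT A =====
-- the command loop over the deque: returns none on the 'error' early return
def acLoopA : List Char → List Int → Bool → Option (List Int × Bool)
  | [], deq, rev => some (deq, rev)
  | c :: cs, deq, rev =>
    if c = 'R' then acLoopA cs deq (!rev)
    else if c = 'D' then
      if deq.isEmpty then none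
      else if rev then acLoopA cs deq.dropLast rev
      else acLoopA cs deq.tail rev
    else acLoopA cs deq rev

def ac_program (p : String) (n : Int) (arr : List Int) : String :=
  match acLoopA p.toList arr false with
  | none => "error"
  | some (deq, rev) =>
    let deq := if rev then deq.reverse else deq
    "[" ++ PySem.Str.join "," (deq.map PySem.Int.toStr) ++ "]"

-- ===== PORT B =====
-- the counting pass: (rev parity, front deletions, total deletions); never fails
def acCount : List Char → Bool → Int → Int → Bool × Int × Int
  | [], rev, front, total => (rev, front, total)
  | c :: cs, rev, front, total =>
    if c = 'R' then acCount cs (!rev) front total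
    else if c = 'D' then acCount cs rev (if rev then front else front + 1) (total + 1)
    else acCount cs rev front total

def ac_program_alt (p : String) (n : Int) (arr : List Int) : String :=
  let (rev, front, total) := acCount p.toList false 0 0
  if total > (arr.length : Int) then "error"
  else
    let res := PySem.List.slice arr (some front) (some ((arr.length : Int) - (total - front)))
    let res := if rev then res.reverse else res
    "[" ++ PySem.Str.join "," (res.map PySem.Int.toStr) ++ "]"

-- ===== PRECONDITION & SPEC =====
def Spec_ac_program (p : String) (n : Int) (arr : List Int) (out : String) : Prop := out = ac_program_alt p n arr
instance (p : String) (n : Int) (arr : List Int) (out : String) : Decidable (Spec_ac_program p n arr out) := by unfold Spec_ac_program; infer_instance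

-- ===== CLAIM (what is proved, stated in full; the proofs are below) =====
def Claim_equal_ac_program : Prop := ∀ (p : String) (n : Int) (arr : List Int), Dom_ac_program p n arr → Spec_ac_program p n arr (ac_program p n arr)

-- ===== LEMMAS AND PROOFS =====

-- accumulator shift for the counting pass
theorem acCount_shift (cs : List Char) : ∀ (rev : Bool) (f t : Int),
    acCount cs rev f t
      = ((acCount cs rev 0 0).1, f + (acCount cs rev 0 0).2.1, t + (acCount cs rev 0 0).2.2) := by
  induction cs with
  | nil => intro rev f t; simp [acCount]
  | cons c cs ih =>
    intro rev f t
    by_cases hR : c = 'R'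
    · simp only [acCount, if_pos hR]
      rw [ih (!rev) f t, ih (!rev) 0 0]
    by_cases hD : c = 'D'
    · simp only [acCount, if_neg hR, if_pos hD]
      cases rev with
      | false =>
        simp only [Bool.false_eq_true, if_false]
        rw [ih false (f + 1) (t + 1), ih false (0 + 1) (0 + 1)]
        dsimp only
        simp only [Prod.mk.injEq]
        exact ⟨trivial, by ring, by ring⟩
      | true =>
        simp only [if_true]
        rw [ih true f (t + 1), ih true 0 (0 + 1)]
        dsimp only
        simp only [Prod.mk.injEq]
        exact ⟨trivial, by ring, by ring⟩
    · simp only [acCount, if_neg hR, if_neg hD]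
      rw [ih rev f t, ih rev 0 0]

-- take after dropLast equals plain take when the length stays inside
theorem dropLast_drop_take (xs : List Int) (f k : Nat) (h : f + k + 1 ≤ xs.length) :
    (xs.dropLast.drop f).take k = (xs.drop f).take k := by
  rw [List.dropLast_eq_take, List.drop_take, List.take_take]
  congr 1
  omega

-- the deque simulation computes exactly what the counting pass describes
theorem acLoopA_count (cs : List Char) : ∀ (deq : List Int) (rev : Bool),
    0 ≤ (acCount cs rev 0 0).2.1 ∧
    (acCount cs rev 0 0).2.1 ≤ (acCount cs rev 0 0).2.2 ∧
    acLoopA cs deq rev =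
      (if (acCount cs rev 0 0).2.2 ≤ (deq.length : Int)
       then some ((deq.drop (acCount cs rev 0 0).2.1.toNat).take
                    (deq.length - (acCount cs rev 0 0).2.2.toNat), (acCount cs rev 0 0).1)
       else none) := by
  induction cs with
  | nil =>
    intro deq rev
    refine ⟨le_refl 0, le_refl 0, ?_⟩
    simp [acCount, acLoopA]
  | cons c cs ih =>
    intro deq rev
    by_cases hR : c = 'R'
    · have hc : acCount (c :: cs) rev 0 0 = acCount cs (!rev) 0 0 := by
        simp [acCount, hR]
      have hl : acLoopA (c :: cs) deq rev = acLoopA cs deq (!rev) := by simp [acLoopA, hR]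
      rw [hc, hl]; exact ih deq (!rev)
    by_cases hD : c = 'D'
    · cases rev with
      | false =>
        have hc : acCount (c :: cs) false 0 0
            = ((acCount cs false 0 0).1, 1 + (acCount cs false 0 0).2.1,
               1 + (acCount cs false 0 0).2.2) := by
          simp only [acCount, if_neg hR, if_pos hD]
          rw [acCount_shift cs false]
          simp
        rw [hc]
        obtain ⟨hF, hFT, _⟩ := ih deq false
        dsimp only
        refine ⟨by omega, by omega, ?_⟩
        rcases deq with _ | ⟨x, dq⟩
        · rw [if_neg (by simp; omega)]
          simp [acLoopA, hD]
        · have hl : acLoopA (c :: cs) (x :: dq) false = acLoopA cs dq false := by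
            simp [acLoopA, hD]
          obtain ⟨_, _, hEq⟩ := ih dq false
          rw [hl, hEq]
          have hxd : (((x :: dq).length : Int)) = (dq.length : Int) + 1 := by simp
          by_cases hle : (acCount cs false 0 0).2.2 ≤ (dq.length : Int)
          · rw [if_pos hle, if_pos (by omega)]
            have h1 : (1 + (acCount cs false 0 0).2.1).toNat
                = (acCount cs false 0 0).2.1.toNat + 1 := by omega
            have h2 : (x :: dq).length - (1 + (acCount cs false 0 0).2.2).toNat
                = dq.length - (acCount cs false 0 0).2.2.toNat := by
              simp only [List.length_cons]; omega
            rw [h1, h2]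
            simp
          · rw [if_neg hle, if_neg (by omega)]
      | true =>
        have hc : acCount (c :: cs) true 0 0
            = ((acCount cs true 0 0).1, (acCount cs true 0 0).2.1,
               1 + (acCount cs true 0 0).2.2) := by
          simp only [acCount, if_neg hR, if_pos hD]
          rw [acCount_shift cs true]
          simp
        rw [hc]
        obtain ⟨hF, hFT, _⟩ := ih deq true
        dsimp only
        refine ⟨by omega, by omega, ?_⟩
        rcases deq with _ | ⟨x, dq⟩
        · rw [if_neg (by simp; omega)]
          simp [acLoopA, hD]
        · have hne : ((x :: dq) : List Int).isEmpty = false := by simp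
          have hl : acLoopA (c :: cs) (x :: dq) true = acLoopA cs (x :: dq).dropLast true := by
            simp [acLoopA, hD, hne]
          obtain ⟨_, _, hEq⟩ := ih (x :: dq).dropLast true
          rw [hl, hEq]
          have hlen : ((x :: dq).dropLast).length = dq.length := by simp
          have hxd : (((x :: dq).length : Int)) = (dq.length : Int) + 1 := by simp
          by_cases hle : (acCount cs true 0 0).2.2 ≤ (dq.length : Int)
          · rw [if_pos (by rw [hlen]; exact hle), if_pos (by omega)]
            have h2 : (x :: dq).length - (1 + (acCount cs true 0 0).2.2).toNat
                = (x :: dq).dropLast.length - (acCount cs true 0 0).2.2.toNat := by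
              rw [hlen]; simp only [List.length_cons]; omega
            rw [h2, dropLast_drop_take (x :: dq) _ _
              (by simp only [hlen, List.length_cons]; omega)]
          · rw [if_neg (by rw [hlen]; exact hle), if_neg (by omega)]
    · have hc : acCount (c :: cs) rev 0 0 = acCount cs rev 0 0 := by
        simp [acCount, hR, hD]
      have hl : acLoopA (c :: cs) deq rev = acLoopA cs deq rev := by simp [acLoopA, hR, hD]
      rw [hc, hl]; exact ih deq rev

-- ===== VERDICT (by name: the statement is the Claim_ definition above) =====
theorem ac_program_spec : Claim_equal_ac_program := by
  intro p n arr _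
  unfold Spec_ac_program ac_program ac_program_alt
  obtain ⟨hF, hFT, hEq⟩ := acLoopA_count p.toList arr false
  rw [hEq]
  set C := acCount p.toList false 0 0 with hC
  obtain ⟨rev, front, total⟩ := C
  simp only at hF hFT ⊢
  by_cases hle : total ≤ (arr.length : Int)
  · rw [if_pos hle, if_neg (by omega)]
    have hslice : PySem.List.slice arr (some front) (some ((arr.length : Int) - (total - front)))
        = (arr.drop front.toNat).take (((arr.length : Int) - (total - front)).toNat - front.toNat) :=
      PySem.List.slice_toNat arr hF (by omega)
    have harith : ((arr.length : Int) - (total - front)).toNat - front.toNat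
        = arr.length - total.toNat := by omega
    rw [hslice, harith]
  · rw [if_neg hle, if_pos (by omega)]
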